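-- pv_equiv track=rewrite | github.com/Uzay-G/breakpoint | lib/code_benchmark.py | _get_related_functions
-- ===== SOURCE A (Python) =====
-- def _get_related_functions(function_key, function_graph, max_distance=3):
--     """
--     Get a set of functions related to the given function within a certain distance in the graph.
--
--     Args:
--         function_key: Tuple of (file_path, function_name) for the function
--         function_graph: The function dependency graph
--         max_distance: Maximum distance to consider functions related
--
--     Returns:
--         Set of related function keys
--     """
--     if function_key not in function_graph:
--         return set()
--
--     # BFS to find related functions within max_distance
--     visited = {function_key}
--     queue = [(function_key, 0)]  # (function_key, distance)
--     related = set()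
--
--     while queue:
--         current_key, distance = queue.pop(0)
--
--         # If we've reached the max distance, don't explore further
--         if distance >= max_distance:
--             continue
--
--         # Get neighbors (both callers and callees)
--         neighbors = function_graph.get(current_key, set())
--         callers = {
--             caller
--             for caller in function_graph
--             if current_key in function_graph[caller]
--         }
--
--         all_neighbors = neighbors.union(callers)
--
--         for neighbor in all_neighbors:
--             if neighbor not in visited:
--                 visited.add(neighbor)
--                 queue.append((neighbor, distance + 1))
--                 related.add(neighbor)
--
--     return related
-- ===== SOURCE B (Python) =====
-- def _get_related_functions(function_key, function_graph, max_distance=3):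
--     """Same result as A, via a combined (callee+caller) adjacency index built
--     once up front, then a level-by-level BFS over it."""
--     if function_key not in function_graph:
--         return set()
--
--     # Build the undirected adjacency index once.
--     adj = {k: list(v) for k, v in function_graph.items()}
--     for caller, callees in function_graph.items():
--         for callee in callees:
--             adj.setdefault(callee, []).append(caller)
--
--     visited = {function_key}
--     related = set()
--     frontier = [function_key]
--     depth = 0
--     while frontier and depth < max_distance:
--         next_frontier = []
--         for u in frontier:
--             for n in adj.get(u, []):
--                 if n not in visited:
--                     visited.add(n)
--                     related.add(n)
--                     next_frontier.append(n)
--         frontier = next_frontier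
--         depth += 1
--     return related
-- ===== Notes on version B (the rewrite author's own statement) =====
-- stated objective: alternative
-- what changed: B precomputes a combined callee+caller adjacency index in one pass over the graph and runs a level-by-level frontier BFS over it, instead of A's distance-tagged queue BFS that rescans the entire graph for callers at every dequeued node.
import Mathlib
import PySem

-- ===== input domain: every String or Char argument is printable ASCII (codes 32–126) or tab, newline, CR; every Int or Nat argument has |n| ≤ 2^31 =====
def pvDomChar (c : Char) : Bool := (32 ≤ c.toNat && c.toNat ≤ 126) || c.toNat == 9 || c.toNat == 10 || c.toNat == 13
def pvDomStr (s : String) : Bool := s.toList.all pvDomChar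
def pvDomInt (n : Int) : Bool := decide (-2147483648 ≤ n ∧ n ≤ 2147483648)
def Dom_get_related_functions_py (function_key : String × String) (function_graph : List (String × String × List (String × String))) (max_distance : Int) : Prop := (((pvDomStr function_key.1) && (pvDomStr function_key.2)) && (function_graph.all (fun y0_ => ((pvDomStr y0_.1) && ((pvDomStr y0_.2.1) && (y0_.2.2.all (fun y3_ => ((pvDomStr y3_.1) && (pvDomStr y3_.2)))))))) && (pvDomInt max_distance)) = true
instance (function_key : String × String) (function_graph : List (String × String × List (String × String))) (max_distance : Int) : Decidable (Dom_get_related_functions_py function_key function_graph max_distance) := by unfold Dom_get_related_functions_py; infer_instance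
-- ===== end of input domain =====

-- B builds the combined caller+callee adjacency index once and runs a level-by-level BFS,
-- where A recomputes each node's callers by scanning the whole graph inside a distance-tagged
-- queue loop (objective: alternative). Both Pythons return a set; the Lean result lists are
-- the sets in first-insertion order.

abbrev pvNode : Type := String × String

-- the Python dict {(file, name): set(callees)} both functions receive
def pvGraphDict (function_graph : List (String × String × List (String × String))) :
    PySem.Dict pvNode (List pvNode) :=
  PySem.Dict.ofList (function_graph.map (fun e => ((e.1, e.2.1), PySem.Set.ofList e.2.2)))

-- ===== PORT A =====
-- {caller for caller in function_graph if current_key in function_graph[caller]}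
def aCallers (d : PySem.Dict pvNode (List pvNode)) (u : pvNode) : List pvNode :=
  PySem.Set.ofList ((PySem.Dict.keys d).filter (fun c => PySem.Set.contains (PySem.Dict.getD d c []) u))

-- all_neighbors = neighbors.union(callers)
def aAll (d : PySem.Dict pvNode (List pvNode)) (u : pvNode) : List pvNode :=
  PySem.Set.union (PySem.Dict.getD d u []) (aCallers d u)

-- body of "for neighbor in all_neighbors", state = (visited, queue, related)
def aStep (dist : Int) (st : List pvNode × List (pvNode × Int) × List pvNode) (n : pvNode) :
    List pvNode × List (pvNode × Int) × List pvNode :=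
  if PySem.Set.contains st.1 n then st
  else (PySem.Set.add st.1 n, st.2.1 ++ [(n, dist + 1)], PySem.Set.add st.2.2 n)

-- "while queue:" with queue.pop(0); fuel only makes the recursion structural,
-- it is always sufficient (the caller passes more than the node universe size)
def aLoop (d : PySem.Dict pvNode (List pvNode)) (md : Int) :
    Nat → List (pvNode × Int) → List pvNode → List pvNode → List pvNode
  | 0, _, _, related => related
  | _ + 1, [], _, related => related
  | fuel + 1, (u, dist) :: rest, visited, related =>
    if md ≤ dist then aLoop d md fuel rest visited related
    else
      let st := (aAll d u).foldl (aStep dist) (visited, rest, related)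
      aLoop d md fuel st.2.1 st.1 st.2.2

def get_related_functions_py (function_key : String × String) (function_graph : List (String × String × List (String × String))) (max_distance : Int) : List (String × String) :=
  let d := pvGraphDict function_graph
  if PySem.Dict.contains d function_key then
    aLoop d max_distance
      (2 + function_graph.length + (function_graph.map (fun e => e.2.2.length)).sum)
      [(function_key, 0)] [function_key] []
  else []

-- ===== PORT B =====
-- adj = {k: list(v) …}; then adj.setdefault(callee, []).append(caller) over all edges
def bAdj (d : PySem.Dict pvNode (List pvNode)) : PySem.Dict pvNode (List pvNode) :=
  (PySem.Dict.items d).foldl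
    (fun a p => p.2.foldl (fun a2 n => PySem.Dict.modify a2 n [] (· ++ [p.1])) a) d

-- body of "for n in adj.get(u, [])", state = (visited, next_frontier, related)
def bInner (st : List pvNode × List pvNode × List pvNode) (n : pvNode) :
    List pvNode × List pvNode × List pvNode :=
  if PySem.Set.contains st.1 n then st
  else (PySem.Set.add st.1 n, st.2.1 ++ [n], PySem.Set.add st.2.2 n)

def bStep (adj : PySem.Dict pvNode (List pvNode)) (st : List pvNode × List pvNode × List pvNode)
    (u : pvNode) : List pvNode × List pvNode × List pvNode :=
  (PySem.Dict.getD adj u []).foldl bInner st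

-- "while frontier and depth < max_distance": the level counter is structural
def bLoop (adj : PySem.Dict pvNode (List pvNode)) :
    Nat → List pvNode → List pvNode → List pvNode → List pvNode
  | 0, _, _, related => related
  | k + 1, frontier, visited, related =>
    if frontier.isEmpty then related
    else
      let st := frontier.foldl (bStep adj) (visited, [], related)
      bLoop adj k st.2.1 st.1 st.2.2

def get_related_functions_py_alt (function_key : String × String) (function_graph : List (String × String × List (String × String))) (max_distance : Int) : List (String × String) :=
  let d := pvGraphDict function_graph
  if PySem.Dict.contains d function_key then
    bLoop (bAdj d) max_distance.toNat [function_key] [function_key] []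
  else []

-- ===== PRECONDITION & SPEC =====
def Spec_get_related_functions_py (function_key : String × String) (function_graph : List (String × String × List (String × String))) (max_distance : Int) (out : List (String × String)) : Prop := out = get_related_functions_py_alt function_key function_graph max_distance
instance (function_key : String × String) (function_graph : List (String × String × List (String × String))) (max_distance : Int) (out : List (String × String)) : Decidable (Spec_get_related_functions_py function_key function_graph max_distance out) := by unfold Spec_get_related_functions_py; infer_instance

-- ===== CLAIM (what is proved, stated in full; the proofs are below) =====
def Claim_equal_get_related_functions_py : Prop := ∀ (function_key : String × String) (function_graph : List (String × String × List (String × String))) (max_distance : Int), Dom_get_related_functions_py function_key function_graph max_distance → Spec_get_related_functions_py function_key function_graph max_distance (get_related_functions_py function_key function_graph max_distance)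

-- ===== LEMMAS AND PROOFS =====

-- the nodes of l not yet in v, in order, each counted once
def newOnes : List pvNode → List pvNode → List pvNode
  | _, [] => []
  | v, n :: l => if PySem.Set.contains v n then newOnes v l else n :: newOnes (v ++ [n]) l

-- nodes discovered by one BFS level, in order
def levelNew (adj : PySem.Dict pvNode (List pvNode)) : List pvNode → List pvNode → List pvNode
  | _, [] => []
  | v, u :: fs =>
    let w := newOnes v (PySem.Dict.getD adj u [])
    w ++ levelNew adj (v ++ w) fs

-- the dict built from the input has Nodup keys and Nodup (set) values
def pvGood (d : PySem.Dict pvNode (List pvNode)) : Prop :=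
  d.keys.Nodup ∧ ∀ p ∈ d.items, p.2.Nodup

theorem newOnes_sub : ∀ (l v : List pvNode) (x : pvNode), x ∈ newOnes v l → x ∈ l ∧ x ∉ v := by
  intro l
  induction l with
  | nil => intro v x h; simp [newOnes] at h
  | cons n l ih =>
    intro v x h
    simp only [newOnes] at h
    split at h
    · rcases ih v x h with ⟨h1, h2⟩
      exact ⟨List.mem_cons_of_mem _ h1, h2⟩
    · rename_i hc
      rcases List.mem_cons.1 h with rfl | h'
      · refine ⟨List.mem_cons_self, ?_⟩
        simpa [PySem.Set.contains] using hc
      · rcases ih (v ++ [n]) x h' with ⟨h1, h2⟩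
        exact ⟨List.mem_cons_of_mem _ h1, fun hx => h2 (List.mem_append_left _ hx)⟩

theorem mem_append_newOnes : ∀ (l v : List pvNode) (x : pvNode), x ∈ l → x ∈ v ++ newOnes v l := by
  intro l
  induction l with
  | nil => intro v x h; simp at h
  | cons n l ih =>
    intro v x h
    simp only [newOnes]
    split
    · rename_i hc
      rcases List.mem_cons.1 h with rfl | h'
      · exact List.mem_append_left _ (by simpa [PySem.Set.contains] using hc)
      · exact ih v x h'
    · rcases List.mem_cons.1 h with rfl | h'
      · simp
      · have := ih (v ++ [n]) x h'
        simp only [List.mem_append] at this ⊢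
        rcases this with (h | h) | h
        · exact Or.inl h
        · simp at h; subst h; simp
        · simp [h]

theorem newOnes_nodup : ∀ (l v : List pvNode), (newOnes v l).Nodup := by
  intro l
  induction l with
  | nil => intro v; simp [newOnes]
  | cons n l ih =>
    intro v
    simp only [newOnes]
    split
    · exact ih v
    · refine List.nodup_cons.2 ⟨fun h => ?_, ih (v ++ [n])⟩
      exact (newOnes_sub l (v ++ [n]) n h).2 (by simp)

theorem newOnes_append : ∀ (l1 l2 v : List pvNode),
    newOnes v (l1 ++ l2) = newOnes v l1 ++ newOnes (v ++ newOnes v l1) l2 := by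
  intro l1
  induction l1 with
  | nil => intro l2 v; simp [newOnes]
  | cons n l1 ih =>
    intro l2 v
    simp only [List.cons_append, newOnes]
    split
    · exact ih l2 v
    · simp only [List.cons_append, ih l2 (v ++ [n]), List.append_assoc, List.nil_append]

theorem newOnes_filter : ∀ (l v : List pvNode) (p : pvNode → Bool),
    (∀ x ∈ l, p x = false → x ∈ v) → newOnes v (l.filter p) = newOnes v l := by
  intro l
  induction l with
  | nil => intro v p h; simp
  | cons n l ih =>
    intro v p h
    by_cases hp : p n = true
    · rw [List.filter_cons_of_pos hp]
      simp only [newOnes]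
      split
      · exact ih v p (fun x hx => h x (List.mem_cons_of_mem _ hx))
      · rw [ih (v ++ [n]) p (fun x hx hpx => List.mem_append_left _ (h x (List.mem_cons_of_mem _ hx) hpx))]
    · rw [List.filter_cons_of_neg (by simpa using hp)]
      have hv : n ∈ v := h n List.mem_cons_self (by simpa using hp)
      have : PySem.Set.contains v n = true := by simpa [PySem.Set.contains] using hv
      simp only [newOnes, this, if_pos]
      exact ih v p (fun x hx => h x (List.mem_cons_of_mem _ hx))

theorem foldA_char (dist : Int) : ∀ (l v : List pvNode) (q : List (pvNode × Int)) (r : List pvNode),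
    l.foldl (aStep dist) (v, q, r)
      = (v ++ newOnes v l, q ++ (newOnes v l).map (fun n => (n, dist + 1)),
         (newOnes v l).foldl PySem.Set.add r) := by
  intro l
  induction l with
  | nil => intro v q r; simp [newOnes]
  | cons n l ih =>
    intro v q r
    by_cases hc : PySem.Set.contains v n = true
    · simp only [List.foldl_cons, aStep, hc, if_pos, newOnes]
      exact ih v q r
    · simp only [List.foldl_cons, aStep, hc, if_neg, Bool.not_eq_true, newOnes, if_neg hc]
      have hnv : n ∉ v := by simpa [PySem.Set.contains] using hc
      rw [show PySem.Set.add v n = v ++ [n] from by simp [PySem.Set.add, PySem.Set.contains, hnv]]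
      rw [ih (v ++ [n]) (q ++ [(n, dist + 1)]) (PySem.Set.add r n)]
      simp [List.append_assoc]

theorem foldB_char : ∀ (l v nf r : List pvNode),
    l.foldl bInner (v, nf, r)
      = (v ++ newOnes v l, nf ++ newOnes v l, (newOnes v l).foldl PySem.Set.add r) := by
  intro l
  induction l with
  | nil => intro v nf r; simp [newOnes]
  | cons n l ih =>
    intro v nf r
    by_cases hc : PySem.Set.contains v n = true
    · simp only [List.foldl_cons, bInner, hc, if_pos, newOnes]
      exact ih v nf r
    · simp only [List.foldl_cons, bInner, hc, if_neg, Bool.not_eq_true, newOnes, if_neg hc]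
      have hnv : n ∉ v := by simpa [PySem.Set.contains] using hc
      rw [show PySem.Set.add v n = v ++ [n] from by simp [PySem.Set.add, PySem.Set.contains, hnv]]
      rw [ih (v ++ [n]) (nf ++ [n]) (PySem.Set.add r n)]
      simp [List.append_assoc]

theorem procB_char (adj : PySem.Dict pvNode (List pvNode)) :
    ∀ (fs v nf r : List pvNode),
    fs.foldl (bStep adj) (v, nf, r)
      = (v ++ levelNew adj v fs, nf ++ levelNew adj v fs,
         (levelNew adj v fs).foldl PySem.Set.add r) := by
  intro fs
  induction fs with
  | nil => intro v nf r; simp [levelNew]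
  | cons u fs ih =>
    intro v nf r
    simp only [List.foldl_cons, levelNew]
    rw [show bStep adj (v, nf, r) u = _ from foldB_char (PySem.Dict.getD adj u []) v nf r]
    rw [ih]
    simp [List.append_assoc, List.foldl_append]

theorem bLoop_nil (adj : PySem.Dict pvNode (List pvNode)) (k : Nat) (v r : List pvNode) :
    bLoop adj k [] v r = r := by
  cases k <;> simp [bLoop]

theorem nodup_length_le (l m : List pvNode) (hl : l.Nodup) (hm : m.Nodup)
    (hsub : ∀ x ∈ l, x ∈ m) : l.length ≤ m.length := by
  have h1 : l.toFinset.card = l.length := List.toFinset_card_of_nodup hl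
  have h2 : m.toFinset.card = m.length := List.toFinset_card_of_nodup hm
  have : l.toFinset ⊆ m.toFinset := by
    intro x hx
    simp only [List.mem_toFinset] at hx ⊢
    exact hsub x hx
  calc l.length = l.toFinset.card := h1.symm
    _ ≤ m.toFinset.card := Finset.card_le_card this
    _ = m.length := h2

theorem values_update_sub (l : List (pvNode × List pvNode)) :
    ∀ (d : PySem.Dict pvNode (List pvNode)) (w : List pvNode),
    w ∈ (PySem.Dict.update d l).values → w ∈ d.values ∨ w ∈ l.map (fun p => p.2) := by
  induction l with
  | nil => intro d w h; exact Or.inl h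
  | cons p l ih =>
    intro d w h
    simp only [PySem.Dict.update, List.foldl_cons] at h
    rcases ih (d.insert p.1 p.2) w h with h' | h'
    · rcases PySem.Dict.mem_values_insert d p.1 p.2 w h' with rfl | h''
      · exact Or.inr (by simp)
      · exact Or.inl h''
    · exact Or.inr (List.mem_cons_of_mem _ h')

theorem pvGood_graphDict (g : List (String × String × List (String × String))) :
    pvGood (pvGraphDict g) := by
  constructor
  · exact PySem.Dict.nodup_keys_ofList _
  · intro p hp
    have hv : p.2 ∈ (pvGraphDict g).values := by
      simp only [PySem.Dict.values, List.mem_map]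
      exact ⟨p, hp, rfl⟩
    rw [show pvGraphDict g = PySem.Dict.update PySem.Dict.empty (g.map (fun e => ((e.1, e.2.1), PySem.Set.ofList e.2.2))) from rfl] at hv
    rcases values_update_sub _ _ _ hv with h | h
    · simp [PySem.Dict.values, PySem.Dict.empty] at h
    · simp only [List.map_map, List.mem_map] at h
      obtain ⟨e, _, he⟩ := h
      rw [← he]
      exact PySem.Set.nodup_ofList _

theorem keys_ofList (l : List (pvNode × List pvNode)) :
    (PySem.Dict.ofList l).keys = PySem.Set.ofList (l.map (fun p => p.1)) := by
  have := PySem.Dict.keys_foldl_insert_key l (fun p => p.1) (fun _ p => p.2) PySem.Dict.empty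
  simp only [PySem.Dict.ofList, PySem.Dict.update]
  calc (List.foldl (fun acc p => acc.insert p.1 p.2) PySem.Dict.empty l).keys
      = PySem.Set.update PySem.Dict.empty.keys (l.map (fun p => p.1)) := this
    _ = PySem.Set.ofList (l.map (fun p => p.1)) := by
        simp [PySem.Dict.empty, PySem.Dict.keys, PySem.Set.update_nil_left]

theorem blockEq (u c : pvNode) : ∀ (xs : List pvNode), xs.Nodup →
    ((xs.map (fun n => (n, c))).filter (fun q => q.1 == u)).map (fun q => q.2)
      = if PySem.Set.contains xs u then [c] else [] := by
  intro xs
  induction xs with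
  | nil => intro _; simp [PySem.Set.contains]
  | cons x xs ih =>
    intro h
    rcases List.nodup_cons.1 h with ⟨hx, hxs⟩
    simp only [List.map_cons, List.filter_cons]
    by_cases hxu : x = u
    · subst hxu
      have h1 : PySem.Set.contains xs x = false := by simpa [PySem.Set.contains] using hx
      simp [ih hxs, h1, PySem.Set.contains, hx]
    · have hbe : ((x, c).1 == u) = false := by simpa using hxu
      have hux : ¬u = x := fun h' => hxu h'.symm
      simp [hbe, ih hxs, PySem.Set.contains, hux]

theorem flat_filter (u : pvNode) : ∀ (l : List (pvNode × List pvNode)), (∀ p ∈ l, p.2.Nodup) →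
    ((l.flatMap (fun p => p.2.map (fun n => (n, p.1)))).filter (fun q => q.1 == u)).map (fun q => q.2)
      = (l.filter (fun p => PySem.Set.contains p.2 u)).map (fun p => p.1) := by
  intro l
  induction l with
  | nil => intro _; simp
  | cons p l ih =>
    intro h
    simp only [List.flatMap_cons, List.filter_append, List.map_append,
      ih (fun q hq => h q (List.mem_cons_of_mem _ hq)), blockEq u p.1 p.2 (h p List.mem_cons_self)]
    by_cases hm : u ∈ p.2
    · simp [List.filter_cons, hm, PySem.Set.contains]
    · simp [List.filter_cons, hm, PySem.Set.contains]

theorem bAdj_getD (d : PySem.Dict pvNode (List pvNode)) (hd : pvGood d) (u : pvNode) :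
    PySem.Dict.getD (bAdj d) u []
      = PySem.Dict.getD d u []
        ++ ((d.items.filter (fun p => PySem.Set.contains p.2 u)).map (fun p => p.1)) := by
  have h1 : bAdj d
      = (d.items.flatMap (fun p => p.2.map (fun n => (n, p.1)))).foldl
          (fun a2 q => PySem.Dict.modify a2 q.1 [] (· ++ [q.2])) d := by
    rw [List.foldl_flatMap]
    unfold bAdj
    congr 1
    funext a p
    rw [List.foldl_map]
  rw [h1, PySem.Dict.getD_foldl_modify_append, flat_filter u d.items hd.2]

theorem aCallers_eq (d : PySem.Dict pvNode (List pvNode)) (hd : pvGood d) (u : pvNode) :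
    aCallers d u = (d.items.filter (fun p => PySem.Set.contains p.2 u)).map (fun p => p.1) := by
  unfold aCallers
  rw [PySem.Set.ofList_eq_self_of_nodup _ (List.Nodup.filter _ hd.1)]
  rw [PySem.Dict.items_eq_map_keys d hd.1 []]
  rw [List.filter_map, List.map_map]
  simp [Function.comp_def]

theorem newOnes_aAll (d : PySem.Dict pvNode (List pvNode)) (hd : pvGood d) (u : pvNode)
    (v : List pvNode) : newOnes v (aAll d u) = newOnes v (PySem.Dict.getD (bAdj d) u []) := by
  have hcallers : (aCallers d u).Nodup := PySem.Set.nodup_ofList _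
  have hall : aAll d u
      = PySem.Dict.getD d u []
        ++ (aCallers d u).filter (fun y => !(PySem.Set.contains (PySem.Dict.getD d u []) y)) := by
    unfold aAll
    rw [show PySem.Set.union (PySem.Dict.getD d u []) (aCallers d u)
        = PySem.Set.update (PySem.Dict.getD d u []) (aCallers d u) from rfl]
    rw [PySem.Set.update_eq_append_filter]
    rw [PySem.Set.ofList_eq_self_of_nodup _ hcallers]
  rw [hall, bAdj_getD d hd u, aCallers_eq d hd u]
  rw [newOnes_append, newOnes_append]
  congr 1
  apply newOnes_filter
  intro x hx hpx
  have hxf : x ∈ PySem.Dict.getD d u [] := by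
    simp only [Bool.not_eq_false'] at hpx
    simpa [PySem.Set.contains] using hpx
  exact mem_append_newOnes _ _ _ hxf

theorem aLoop_skip (d : PySem.Dict pvNode (List pvNode)) (md : Int) :
    ∀ (q : List (pvNode × Int)) (fuel : Nat) (v r : List pvNode),
    (∀ p ∈ q, md ≤ p.2) → q.length + 1 ≤ fuel → aLoop d md fuel q v r = r := by
  intro q
  induction q with
  | nil =>
    intro fuel v r _ hf
    match fuel, hf with
    | f + 1, _ => simp [aLoop]
  | cons p q ih =>
    intro fuel v r hq hf
    match fuel, hf with
    | f + 1, hf =>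
      obtain ⟨u, dist⟩ := p
      have : md ≤ dist := hq (u, dist) List.mem_cons_self
      simp only [aLoop, if_pos this]
      exact ih f v r (fun p hp => hq p (List.mem_cons_of_mem _ hp)) (by simpa using Nat.lt_succ_iff.mp (Nat.lt_of_lt_of_le (Nat.lt_succ_self _) hf))

theorem pvMain (d : PySem.Dict pvNode (List pvNode)) (hd : pvGood d) (md : Int)
    (U : List pvNode) (hU : U.Nodup)
    (hadj : ∀ (u : pvNode), ∀ n ∈ PySem.Dict.getD (bAdj d) u [], n ∈ U) :
    ∀ (n fuel : Nat) (dist : Int) (front next v r : List pvNode),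
    fuel + (md - dist).toNat ≤ n →
    dist < md →
    v.Nodup → (∀ x ∈ v, x ∈ U) →
    front.length + next.length + (U.length - v.length) + 1 ≤ fuel →
    aLoop d md fuel (front.map (fun u => (u, dist)) ++ next.map (fun u => (u, dist + 1))) v r
      = bLoop (bAdj d) ((md - dist - 1).toNat)
          (next ++ levelNew (bAdj d) v front) (v ++ levelNew (bAdj d) v front)
          ((levelNew (bAdj d) v front).foldl PySem.Set.add r) := by
  intro n
  induction n using Nat.strong_induction_on with
  | _ n IH =>
    intro fuel dist front next v r hn hdist hv hvU hfuel
    match front with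
    | u :: front' =>
      match fuel, hfuel with
      | f + 1, hfuel =>
        set w := newOnes v (PySem.Dict.getD (bAdj d) u []) with hw
        have hwn : newOnes v (aAll d u) = w := newOnes_aAll d hd u v
        have hwsub : ∀ x ∈ w, x ∈ PySem.Dict.getD (bAdj d) u [] ∧ x ∉ v :=
          fun x hx => newOnes_sub _ _ _ hx
        have hvw : (v ++ w).Nodup := by
          rw [List.nodup_append]
          refine ⟨hv, newOnes_nodup _ _, ?_⟩
          intro a ha b hb heq
          exact (hwsub b hb).2 (heq ▸ ha)
        have hvwU : ∀ x ∈ v ++ w, x ∈ U := by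
          intro x hx
          rcases List.mem_append.1 hx with h | h
          · exact hvU x h
          · exact hadj u x (hwsub x h).1
        have hlen : v.length + w.length ≤ U.length := by
          have := nodup_length_le (v ++ w) U hvw hU hvwU
          simpa using this
        simp only [List.map_cons, List.cons_append, aLoop, if_neg (not_le.2 hdist)]
        rw [foldA_char dist (aAll d u) v (front'.map (fun u => (u, dist)) ++ next.map (fun u => (u, dist + 1))) r]
        simp only [hwn]
        have hq : (front'.map (fun u => (u, dist)) ++ next.map (fun u => (u, dist + 1)))
              ++ w.map (fun n => (n, dist + 1))
            = front'.map (fun u => (u, dist)) ++ (next ++ w).map (fun u => (u, dist + 1)) := by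
          rw [List.map_append, List.append_assoc]
        simp only [hq]
        have hIH := IH (f + (md - dist).toNat) (by omega) f dist front' (next ++ w) (v ++ w)
          (w.foldl PySem.Set.add r) (by omega) hdist hvw hvwU
          (by simp only [List.length_append]; simp only [List.length_cons] at hfuel; omega)
        rw [hIH]
        show bLoop _ _ _ _ _ = _
        have hlev : levelNew (bAdj d) v (u :: front') = w ++ levelNew (bAdj d) (v ++ w) front' := by
          simp only [levelNew, ← hw]
        rw [hlev]
        rw [List.foldl_append, ← List.append_assoc, ← List.append_assoc]
    | [] =>
      simp only [levelNew, List.append_nil, List.map_nil, List.nil_append, List.foldl_nil]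
      match next with
      | [] =>
        match fuel, hfuel with
        | f + 1, _ => simp [aLoop, bLoop_nil]
      | nx :: next' =>
        by_cases hmd2 : md ≤ dist + 1
        · have h0 : (md - dist - 1).toNat = 0 := by omega
          rw [h0]
          show aLoop d md fuel _ v r = r
          apply aLoop_skip
          · intro p hp
            simp only [List.mem_map] at hp
            obtain ⟨x, _, rfl⟩ := hp
            omega
          · simp only [List.length_map]
            simp only [List.length_nil, List.length_cons] at hfuel ⊢
            omega
        · replace hmd2 : dist + 1 < md := by omega
          have hIH := IH (fuel + (md - (dist + 1)).toNat) (by omega) fuel (dist + 1)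
            (nx :: next') [] v r (by omega) hmd2 hv hvU
            (by simp only [List.length_nil, List.length_cons] at hfuel ⊢; omega)
          simp only [List.map_nil, List.append_nil, List.nil_append] at hIH
          rw [hIH]
          have hk : (md - dist - 1).toNat = (md - (dist + 1) - 1).toNat + 1 := by omega
          rw [hk]
          simp only [bLoop, List.isEmpty_cons, Bool.false_eq_true, if_neg]
          rw [procB_char]
          simp only [List.nil_append]
          simp

theorem flat_len (g : List (String × String × List (String × String))) :
    (g.flatMap (fun e => ((e.1, e.2.1) : pvNode) :: e.2.2)).length
      = g.length + (g.map (fun e => e.2.2.length)).sum := by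
  induction g with
  | nil => simp
  | cons e g ih => simp [List.flatMap_cons, ih]; omega

theorem mem_values_of_get? (d : PySem.Dict pvNode (List pvNode)) (u : pvNode) (w : List pvNode)
    (h : d.get? u = some w) : w ∈ d.values := by
  have := PySem.Dict.mem_items_of_get?_eq_some d h
  simp only [PySem.Dict.values, List.mem_map]
  exact ⟨(u, w), this, rfl⟩

theorem hadj_univ (g : List (String × String × List (String × String))) (key : pvNode) :
    ∀ (u : pvNode), ∀ n ∈ PySem.Dict.getD (bAdj (pvGraphDict g)) u [],
      n ∈ PySem.Set.ofList (key :: g.flatMap (fun e => ((e.1, e.2.1) : pvNode) :: e.2.2)) := by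
  intro u n hn
  rw [PySem.Set.mem_ofList]
  rw [bAdj_getD _ (pvGood_graphDict g) u] at hn
  rcases List.mem_append.1 hn with h | h
  · -- n is a callee of u
    rcases hg : (pvGraphDict g).get? u with _ | w
    · rw [PySem.Dict.getD, hg] at h; simp at h
    · rw [PySem.Dict.getD, hg] at h
      simp only [Option.getD_some] at h
      have hw : w ∈ (pvGraphDict g).values := mem_values_of_get? _ _ _ hg
      rw [show pvGraphDict g = PySem.Dict.update PySem.Dict.empty (g.map (fun e => ((e.1, e.2.1), PySem.Set.ofList e.2.2))) from rfl] at hw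
      rcases values_update_sub _ _ _ hw with h' | h'
      · simp [PySem.Dict.values, PySem.Dict.empty] at h'
      · simp only [List.map_map, List.mem_map, Function.comp] at h'
        obtain ⟨e, he, hew⟩ := h'
        apply List.mem_cons_of_mem
        rw [List.mem_flatMap]
        refine ⟨e, he, List.mem_cons_of_mem _ ?_⟩
        rw [← hew] at h
        exact (PySem.Set.mem_ofList _ _).1 h
  · -- n is a caller, i.e. a key
    simp only [List.mem_map, List.mem_filter] at h
    obtain ⟨p, ⟨hp, _⟩, rfl⟩ := h
    have hk := PySem.Dict.mem_keys_of_mem_items _ hp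
    rw [show (pvGraphDict g) = PySem.Dict.ofList (g.map (fun e => ((e.1, e.2.1), PySem.Set.ofList e.2.2))) from rfl, keys_ofList] at hk
    rw [PySem.Set.mem_ofList] at hk
    simp only [List.map_map, List.mem_map, Function.comp] at hk
    obtain ⟨e, he, hke⟩ := hk
    apply List.mem_cons_of_mem
    rw [List.mem_flatMap]
    exact ⟨e, he, by rw [← hke]; exact List.mem_cons_self⟩

theorem pvFinal : ∀ (function_key : String × String) (function_graph : List (String × String × List (String × String))) (max_distance : Int),
    get_related_functions_py function_key function_graph max_distance
      = get_related_functions_py_alt function_key function_graph max_distance := by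
  intro key g md
  unfold get_related_functions_py get_related_functions_py_alt
  by_cases hc : PySem.Dict.contains (pvGraphDict g) key = true
  · simp only [hc, if_pos]
    by_cases hmd : md ≤ 0
    · rw [Int.toNat_of_nonpos hmd, aLoop_skip _ _ _ _ _ _ ?_ ?_]
      · rfl
      · intro p hp; simp only [List.mem_singleton] at hp; subst hp; exact hmd
      · simp; omega
    · replace hmd : 0 < md := by omega
      set uL : List pvNode := key :: g.flatMap (fun e => ((e.1, e.2.1) : pvNode) :: e.2.2) with huL
      set U : List pvNode := PySem.Set.ofList uL with hU
      have hUnd : U.Nodup := PySem.Set.nodup_ofList _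
      have hUlen : U.length ≤ 1 + g.length + (g.map (fun e => e.2.2.length)).sum := by
        calc U.length ≤ uL.length := PySem.Set.length_ofList_le _
          _ = 1 + (g.length + (g.map (fun e => e.2.2.length)).sum) := by
              rw [huL, List.length_cons, flat_len]; omega
          _ = _ := by omega
      have hmain := pvMain (pvGraphDict g) (pvGood_graphDict g) md U hUnd
        (hadj_univ g key)
        ((2 + g.length + (g.map (fun e => e.2.2.length)).sum) + md.toNat)
        (2 + g.length + (g.map (fun e => e.2.2.length)).sum)
        0 [key] [] [key] [] (by omega) hmd (by simp)
        (by intro x hx; simp at hx; subst hx; rw [hU, PySem.Set.mem_ofList]; exact List.mem_cons_self)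
        (by simp only [List.length_cons, List.length_nil]; omega)
      simp only [List.map_cons, List.map_nil, List.append_nil, List.nil_append] at hmain
      rw [hmain]
      have hk : md.toNat = (md - 0 - 1).toNat + 1 := by omega
      rw [hk]
      simp only [bLoop, List.isEmpty_cons, Bool.false_eq_true]
      rw [procB_char]
      simp
  · simp only [Bool.not_eq_true] at hc
    simp [hc]

-- ===== VERDICT (by name: the statement is the Claim_ definition above) =====
theorem get_related_functions_py_spec : Claim_equal_get_related_functions_py := by
  intro function_key function_graph max_distance _dom
  unfold Spec_get_related_functions_py
  exact pvFinal function_key function_graph max_distance
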